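-- pv_equiv track=rewrite | github.com/devdanzin/code-review-toolkit | plugins/code-review-toolkit/scripts/measure_complexity.py | _effective_line_count
-- ===== SOURCE A (Python) =====
-- def _effective_line_count(source_lines: list[str]) -> int:
--     """Count non-blank, non-comment lines."""
--     count = 0
--     in_docstring = False
--     docstring_quote: str | None = None
--     for line in source_lines:
--         stripped = line.strip()
--         if not stripped:
--             continue
--
--         # Handle multiline strings (rough heuristic).
--         if in_docstring:
--             if docstring_quote and docstring_quote in stripped:
--                 in_docstring = False
--             continue
--
--         if stripped.startswith(('"""', "'''")):
--             quote = stripped[:3]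
--             # Single-line docstring.
--             if stripped.count(quote) >= 2:
--                 continue
--             in_docstring = True
--             docstring_quote = quote
--             continue
--
--         if stripped.startswith("#"):
--             continue
--
--         count += 1
--     return count
-- ===== SOURCE B (Python) =====
-- def _transition(stripped):
--     """Full transition table for one stripped line: entry k gives (next_state, count_delta)
--     from state k, where 0 = code, 1 = inside a \"\"\" docstring, 2 = inside a ''' docstring."""
--     if not stripped:
--         return ((0, 0), (1, 0), (2, 0))
--     from_dq = (0, 0) if '"""' in stripped else (1, 0)
--     from_sq = (0, 0) if "'''" in stripped else (2, 0)
--     if stripped.startswith(('"""', "'''")):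
--         quote = stripped[:3]
--         if stripped.count(quote) >= 2:
--             from_code = (0, 0)
--         else:
--             from_code = (1 if quote == '"""' else 2, 0)
--     elif stripped.startswith('#'):
--         from_code = (0, 0)
--     else:
--         from_code = (0, 1)
--     return (from_code, from_dq, from_sq)
--
--
-- def _effective_line_count(source_lines: list[str]) -> int:
--     """Count non-blank, non-comment lines: map each line to a state-transition table,
--     then fold the tables through the 3-state machine."""
--     count = 0
--     state = 0
--     for table in map(_transition, (line.strip() for line in source_lines)):
--         state, delta = table[state]
--         count += delta
--     return count
-- ===== Notes on version B (the rewrite author's own statement) =====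
-- stated objective: alternative
-- what changed: Replaces A's single pass with flag-based branching (in_docstring/docstring_quote mutable state deciding which checks run) by a map stage that turns every line independently into a complete 3-state transition table (code / inside-triple-double / inside-triple-single, each entry giving next state and count delta) followed by a fold that only indexes the tables through the state machine.
import Mathlib
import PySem

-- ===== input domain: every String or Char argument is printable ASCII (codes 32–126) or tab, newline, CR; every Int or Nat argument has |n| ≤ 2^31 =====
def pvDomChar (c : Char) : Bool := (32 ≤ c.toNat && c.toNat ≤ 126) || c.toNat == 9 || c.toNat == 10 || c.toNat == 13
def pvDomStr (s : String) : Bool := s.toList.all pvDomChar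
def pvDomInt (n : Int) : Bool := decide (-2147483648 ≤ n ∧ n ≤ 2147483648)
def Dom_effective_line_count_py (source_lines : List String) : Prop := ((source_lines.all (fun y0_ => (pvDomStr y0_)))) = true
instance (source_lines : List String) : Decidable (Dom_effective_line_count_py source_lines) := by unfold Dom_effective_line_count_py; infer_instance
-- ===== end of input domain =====

-- B replaces A's flag-based branching pass by mapping each line to a full 3-state transition table and folding the tables (objective: alternative decomposition, same cost).

-- ===== PORT A =====
-- A's loop state: (count, in_docstring, docstring_quote)
def elcStepA (st : Int × Bool × Option String) (line : String) : Int × Bool × Option String :=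
  if PySem.Str.strip line = "" then st
  else if st.2.1 then
    -- 'if docstring_quote and docstring_quote in stripped'
    if (match st.2.2 with
        | some q => decide (q ≠ "") && PySem.Str.isIn q (PySem.Str.strip line)
        | none => false) then (st.1, false, st.2.2)
    else st
  else if PySem.Str.startswith (PySem.Str.strip line) "\"\"\"" ||
          PySem.Str.startswith (PySem.Str.strip line) "'''" then
    if 2 ≤ PySem.Str.count (PySem.Str.strip line)
        (PySem.Str.slice (PySem.Str.strip line) none (some 3)) then st
    else (st.1, true, some (PySem.Str.slice (PySem.Str.strip line) none (some 3)))
  else if PySem.Str.startswith (PySem.Str.strip line) "#" then st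
  else (st.1 + 1, st.2.1, st.2.2)

def effective_line_count_py (source_lines : List String) : Int :=
  (source_lines.foldl elcStepA (0, false, none)).1

-- ===== PORT B =====
-- the full transition table of one stripped line: entry k = (next state, count delta) from state k
-- (0 = code, 1 = inside a """ docstring, 2 = inside a ''' docstring)
def elcTrans (s : String) : (Nat × Int) × (Nat × Int) × (Nat × Int) :=
  if s = "" then ((0, 0), (1, 0), (2, 0))
  else
    let from_dq := if PySem.Str.isIn "\"\"\"" s then ((0 : Nat), (0 : Int)) else (1, 0)
    let from_sq := if PySem.Str.isIn "'''" s then ((0 : Nat), (0 : Int)) else (2, 0)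
    let from_code :=
      if PySem.Str.startswith s "\"\"\"" || PySem.Str.startswith s "'''" then
        let quote := PySem.Str.slice s none (some 3)
        if 2 ≤ PySem.Str.count s quote then ((0 : Nat), (0 : Int))
        else ((if quote = "\"\"\"" then 1 else 2), 0)
      else if PySem.Str.startswith s "#" then (0, 0)
      else (0, 1)
    (from_code, from_dq, from_sq)

-- 'table[state]' of B's loop body
def elcIndex (t : (Nat × Int) × (Nat × Int) × (Nat × Int)) (st : Nat) : Nat × Int :=
  if st = 0 then t.1 else if st = 1 then t.2.1 else t.2.2

def effective_line_count_py_alt (source_lines : List String) : Int :=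
  ((source_lines.map (fun line => elcTrans (PySem.Str.strip line))).foldl
    (fun (acc : Int × Nat) table =>
      let p := elcIndex table acc.2
      (acc.1 + p.2, p.1)) (0, 0)).1

-- ===== PRECONDITION & SPEC =====
def Spec_effective_line_count_py (source_lines : List String) (out : Int) : Prop := out = effective_line_count_py_alt source_lines
instance (source_lines : List String) (out : Int) : Decidable (Spec_effective_line_count_py source_lines out) := by unfold Spec_effective_line_count_py; infer_instance

-- ===== CLAIM (what is proved, stated in full; the proofs are below) =====
def Claim_equal_effective_line_count_py : Prop := ∀ (source_lines : List String), Dom_effective_line_count_py source_lines → Spec_effective_line_count_py source_lines (effective_line_count_py source_lines)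

-- ===== LEMMAS AND PROOFS =====

-- B's fold, abbreviated for the invariant
def elcRunB (acc : Int × Nat) (ls : List String) : Int :=
  ((ls.map (fun line => elcTrans (PySem.Str.strip line))).foldl
    (fun (acc : Int × Nat) table =>
      let p := elcIndex table acc.2
      (acc.1 + p.2, p.1)) acc).1

theorem elcRunB_nil (acc : Int × Nat) : elcRunB acc [] = acc.1 := rfl

theorem elcRunB_cons (acc : Int × Nat) (l : String) (ls : List String) :
    elcRunB acc (l :: ls) =
      elcRunB (acc.1 + (elcIndex (elcTrans (PySem.Str.strip l)) acc.2).2,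
               (elcIndex (elcTrans (PySem.Str.strip l)) acc.2).1) ls := rfl

theorem alt_eq_run (ls : List String) :
    effective_line_count_py_alt ls = elcRunB (0, 0) ls := rfl

-- a stripped line starting with triple quote p has s[:3] = p
theorem slice3_of_startswith (s p : String) (hp : p.toList.length = 3)
    (h : PySem.Str.startswith s p = true) :
    PySem.Str.slice s none (some 3) = p := by
  rw [PySem.Str.startswith_eq] at h
  obtain ⟨t, ht⟩ := (PySem.Chars.startswith_iff _ _).mp h
  apply String.toList_inj.mp
  rw [PySem.Str.toList_slice, PySem.Chars.slice_eq_listSlice,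
    PySem.List.slice_to s.toList (by norm_num : (0:Int) ≤ 3)]
  rw [show ((3:Int).toNat) = 3 from rfl, ← ht, List.take_append_of_le_length (by omega)]
  simp [hp]

-- step evaluation lemmas for A's transition function
theorem stepA_blank (st : Int × Bool × Option String) (l : String)
    (h : PySem.Str.strip l = "") : elcStepA st l = st := by
  simp [elcStepA, h]

theorem stepA_in (count : Int) (q : String) (l : String)
    (h : PySem.Str.strip l ≠ "") (hq : q ≠ "") :
    elcStepA (count, true, some q) l =
      (if PySem.Str.isIn q (PySem.Str.strip l) then (count, false, some q)
       else (count, true, some q)) := by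
  simp [elcStepA, h, hq]

theorem stepA_code (count : Int) (dq : Option String) (l : String)
    (h : PySem.Str.strip l ≠ "") :
    elcStepA (count, false, dq) l =
      (if PySem.Str.startswith (PySem.Str.strip l) "\"\"\"" ||
          PySem.Str.startswith (PySem.Str.strip l) "'''" then
        if 2 ≤ PySem.Str.count (PySem.Str.strip l)
            (PySem.Str.slice (PySem.Str.strip l) none (some 3)) then (count, false, dq)
        else (count, true, some (PySem.Str.slice (PySem.Str.strip l) none (some 3)))
      else if PySem.Str.startswith (PySem.Str.strip l) "#" then (count, false, dq)
      else (count + 1, false, dq)) := by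
  simp [elcStepA, h]

-- evaluation lemmas for B's transition table
theorem elcTrans_blank (s : String) (h : s = "") :
    elcTrans s = ((0, 0), (1, 0), (2, 0)) := by
  rw [h]; rfl

theorem elcTrans_ne (s : String) (h : s ≠ "") :
    elcTrans s =
      ((if PySem.Str.startswith s "\"\"\"" || PySem.Str.startswith s "'''" then
          if 2 ≤ PySem.Str.count s (PySem.Str.slice s none (some 3)) then ((0 : Nat), (0 : Int))
          else ((if PySem.Str.slice s none (some 3) = "\"\"\"" then 1 else 2), 0)
        else if PySem.Str.startswith s "#" then (0, 0)
        else (0, 1)),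
       (if PySem.Str.isIn "\"\"\"" s then ((0 : Nat), (0 : Int)) else (1, 0)),
       (if PySem.Str.isIn "'''" s then ((0 : Nat), (0 : Int)) else (2, 0))) := by
  unfold elcTrans
  rw [if_neg h]

theorem elcIndex0 (t : (Nat × Int) × (Nat × Int) × (Nat × Int)) : elcIndex t 0 = t.1 := rfl
theorem elcIndex1 (t : (Nat × Int) × (Nat × Int) × (Nat × Int)) : elcIndex t 1 = t.2.1 := rfl
theorem elcIndex2 (t : (Nat × Int) × (Nat × Int) × (Nat × Int)) : elcIndex t 2 = t.2.2 := rfl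

-- joint invariant: A's fold equals B's fold under the state correspondence
-- (c, false, _) ~ (c, 0), (c, true, some """) ~ (c, 1), (c, true, some ''') ~ (c, 2)
theorem elc_invariant (ls : List String) :
    (∀ (c : Int) (dq : Option String),
        (ls.foldl elcStepA (c, false, dq)).1 = elcRunB (c, 0) ls) ∧
    (∀ (c : Int), (ls.foldl elcStepA (c, true, some "\"\"\"")).1 = elcRunB (c, 1) ls) ∧
    (∀ (c : Int), (ls.foldl elcStepA (c, true, some "'''")).1 = elcRunB (c, 2) ls) := by
  induction ls with
  | nil => simp [elcRunB_nil]
  | cons l ls ih =>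
    by_cases h0 : PySem.Str.strip l = ""
    · refine ⟨fun c dq => ?_, fun c => ?_, fun c => ?_⟩ <;>
        rw [List.foldl_cons, stepA_blank _ _ h0, elcRunB_cons, elcTrans_blank _ h0]
      · rw [elcIndex0]; simpa using ih.1 c dq
      · rw [elcIndex1]; simpa using ih.2.1 c
      · rw [elcIndex2]; simpa using ih.2.2 c
    · refine ⟨fun c dq => ?_, fun c => ?_, fun c => ?_⟩
      · rw [List.foldl_cons, stepA_code c dq l h0, elcRunB_cons, elcTrans_ne _ h0, elcIndex0]
        by_cases h1 : (PySem.Str.startswith (PySem.Str.strip l) "\"\"\"" ||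
            PySem.Str.startswith (PySem.Str.strip l) "'''") = true
        · rw [if_pos h1, if_pos h1]
          by_cases h2 : 2 ≤ PySem.Str.count (PySem.Str.strip l)
              (PySem.Str.slice (PySem.Str.strip l) none (some 3))
          · rw [if_pos h2, if_pos h2]; simpa using ih.1 c dq
          · rw [if_neg h2, if_neg h2]
            rcases Bool.or_eq_true_iff.mp h1 with hs | hs
            · have hq := slice3_of_startswith _ "\"\"\"" (by decide) hs
              rw [hq, if_pos rfl]
              simpa using ih.2.1 c
            · have hq := slice3_of_startswith _ "'''" (by decide) hs
              rw [hq, if_neg (by decide)]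
              simpa using ih.2.2 c
        · rw [if_neg h1, if_neg h1]
          by_cases h3 : PySem.Str.startswith (PySem.Str.strip l) "#" = true
          · rw [if_pos h3, if_pos h3]; simpa using ih.1 c dq
          · rw [if_neg h3, if_neg h3]; simpa using ih.1 (c + 1) dq
      · rw [List.foldl_cons, stepA_in c _ l h0 (by decide), elcRunB_cons, elcTrans_ne _ h0,
          elcIndex1]
        by_cases hin : PySem.Str.isIn "\"\"\"" (PySem.Str.strip l) = true
        · rw [if_pos hin, if_pos hin]; simpa using ih.1 c (some "\"\"\"")
        · rw [if_neg hin, if_neg hin]; simpa using ih.2.1 c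
      · rw [List.foldl_cons, stepA_in c _ l h0 (by decide), elcRunB_cons, elcTrans_ne _ h0,
          elcIndex2]
        by_cases hin : PySem.Str.isIn "'''" (PySem.Str.strip l) = true
        · rw [if_pos hin, if_pos hin]; simpa using ih.1 c (some "'''")
        · rw [if_neg hin, if_neg hin]; simpa using ih.2.2 c

-- ===== VERDICT (by name: the statement is the Claim_ definition above) =====
theorem effective_line_count_py_spec : Claim_equal_effective_line_count_py := by
  intro source_lines _
  unfold Spec_effective_line_count_py effective_line_count_py
  rw [alt_eq_run]
  exact (elc_invariant source_lines).1 0 none
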